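-- pv_equiv track=rewrite | github.com/mauricioDallOnder/Frances_Treinador_Pronuncia_IA | SpecialRoules.py | handle_est_ce_que
-- ===== SOURCE A (Python) =====
-- def handle_est_ce_que(words):
--     """
--     Detecta e processa as variações de 'est-ce que' para substituir por tokens
--     de pronúncia mais natural.
--
--     Regras aprimoradas:
--     - "est-ce que" → ["éss", "ke"]
--     - "est-ce-que" → ["éss", "ke"]
--     - "qu'est-ce que" → ["késs", "ke"]
--     - "qu'est-ce qui" → ["késs", "ki"]
--     - "est-ce qui" → ["éss", "ki"]
--     """
--     new_words = []
--     i = 0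
--
--     while i < len(words):
--         w_lower = words[i].lower()
--
--         # 1) Verificar "qu'est-ce que/qui"
--         if (i + 3 < len(words) and
--             w_lower in ("qu'", "que") and
--             words[i+1].lower() == "est" and
--             words[i+2].lower() in ("ce", "c'") and
--             words[i+3].lower() in ("que", "qui")):
--
--             new_words.append("késs")
--             new_words.append("ke" if words[i+3].lower() == "que" else "ki")
--             i += 4  # Consumimos 4 tokens
--             continue
--
--         # 2) Verificar "est-ce-que/qui" (tudo junto com hífen)
--         if w_lower in ("est-ce-que", "est-ce-qui"):
--             new_words.append("éss")
--             new_words.append("ke" if w_lower == "est-ce-que" else "ki")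
--             i += 1  # Consumimos 1 token
--             continue
--
--         # 3) Verificar "est-ce que/qui" (3 tokens separados)
--         if (i + 2 < len(words) and
--             w_lower == "est" and
--             words[i+1].lower() in ("ce", "c'") and
--             words[i+2].lower() in ("que", "qui")):
--
--             new_words.append("éss")
--             new_words.append("ke" if words[i+2].lower() == "que" else "ki")
--             i += 3  # Consumimos 3 tokens
--             continue
--
--         # 4) Verificar "est-ce" + "que/qui" (2 tokens)
--         if (i + 1 < len(words) and
--             w_lower == "est-ce" and
--             words[i+1].lower() in ("que", "qui")):
--
--             new_words.append("éss")
--             new_words.append("ke" if words[i+1].lower() == "que" else "ki")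
--             i += 2  # Consumimos 2 tokens
--             continue
--
--         # Caso não seja nenhum desses cenários, não mexe
--         new_words.append(words[i])
--         i += 1
--
--     return new_words
-- ===== SOURCE B (Python) =====
-- # Online finite-state machine: one pass, constant state, each token lowered
-- # and examined exactly once; no window re-scans as in A.
-- def handle_est_ce_que(words):
--     out = []
--     state = 0   # 0 start; 1 qu'/que; 2 +est; 3 +ce/c'; 4 est; 5 est+ce/c'; 6 est-ce
--     buf = []    # original tokens held by the current partial match
--     for w in words:
--         lw = w.lower()
--         if state == 1 and lw == "est":
--             buf.append(w); state = 2; continue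
--         if state == 2 and lw in ("ce", "c'"):
--             buf.append(w); state = 3; continue
--         if state == 3 and lw in ("que", "qui"):
--             out += ["k\u00e9ss", "ke" if lw == "que" else "ki"]
--             buf = []; state = 0; continue
--         if state == 4 and lw in ("ce", "c'"):
--             buf.append(w); state = 5; continue
--         if state in (5, 6) and lw in ("que", "qui"):
--             out += ["\u00e9ss", "ke" if lw == "que" else "ki"]
--             buf = []; state = 0; continue
--         # no transition: flush the partial match and start fresh on w
--         out += buf
--         buf = []
--         if lw in ("qu'", "que"):
--             buf = [w]; state = 1
--         elif lw == "est":
--             buf = [w]; state = 4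
--         elif lw == "est-ce":
--             buf = [w]; state = 6
--         elif lw in ("est-ce-que", "est-ce-qui"):
--             out += ["\u00e9ss", "ke" if lw == "est-ce-que" else "ki"]
--             state = 0
--         else:
--             out.append(w); state = 0
--     out += buf
--     return out
-- ===== Notes on version B (the rewrite author's own statement) =====
-- stated objective: faster
-- what changed: A re-scans a multi-token window at every position with repeated slicing-style comparisons and .lower() calls; B is an online finite-state machine (7 states plus a small pending buffer) that lowers and inspects each token exactly once, flushing the buffer when a partial match fails.
import Mathlib
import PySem

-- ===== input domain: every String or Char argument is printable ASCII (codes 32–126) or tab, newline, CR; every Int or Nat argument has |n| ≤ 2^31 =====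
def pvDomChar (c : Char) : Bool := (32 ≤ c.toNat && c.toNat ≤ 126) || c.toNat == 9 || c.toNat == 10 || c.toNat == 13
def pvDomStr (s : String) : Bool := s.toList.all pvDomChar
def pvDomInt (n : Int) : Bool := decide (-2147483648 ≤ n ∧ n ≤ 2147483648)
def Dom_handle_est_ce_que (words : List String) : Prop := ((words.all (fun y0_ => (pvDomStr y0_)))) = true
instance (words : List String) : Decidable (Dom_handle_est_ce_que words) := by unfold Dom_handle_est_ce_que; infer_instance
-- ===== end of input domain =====

-- B replaces A's window re-scanning branch chain by an online finite-state
-- machine with a pending buffer, consulting each token once (objective: alternative).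

-- ===== PORT A =====
-- Port of A's while-loop as structural recursion on the remaining suffix
-- (index i ↔ the suffix words.drop i); branches in A's order, same conditions.
def handle_est_ce_que : List String → List String
  | [] => []
  | w :: rest =>
    if 3 ≤ rest.length ∧ (PySem.Str.lower w = "qu'" ∨ PySem.Str.lower w = "que") ∧
        PySem.Str.lower (rest.getD 0 "") = "est" ∧
        (PySem.Str.lower (rest.getD 1 "") = "ce" ∨ PySem.Str.lower (rest.getD 1 "") = "c'") ∧
        (PySem.Str.lower (rest.getD 2 "") = "que" ∨ PySem.Str.lower (rest.getD 2 "") = "qui") then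
      "késs" :: (if PySem.Str.lower (rest.getD 2 "") = "que" then "ke" else "ki") ::
        handle_est_ce_que (rest.drop 3)
    else if PySem.Str.lower w = "est-ce-que" ∨ PySem.Str.lower w = "est-ce-qui" then
      "éss" :: (if PySem.Str.lower w = "est-ce-que" then "ke" else "ki") ::
        handle_est_ce_que rest
    else if 2 ≤ rest.length ∧ PySem.Str.lower w = "est" ∧
        (PySem.Str.lower (rest.getD 0 "") = "ce" ∨ PySem.Str.lower (rest.getD 0 "") = "c'") ∧
        (PySem.Str.lower (rest.getD 1 "") = "que" ∨ PySem.Str.lower (rest.getD 1 "") = "qui") then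
      "éss" :: (if PySem.Str.lower (rest.getD 1 "") = "que" then "ke" else "ki") ::
        handle_est_ce_que (rest.drop 2)
    else if 1 ≤ rest.length ∧ PySem.Str.lower w = "est-ce" ∧
        (PySem.Str.lower (rest.getD 0 "") = "que" ∨ PySem.Str.lower (rest.getD 0 "") = "qui") then
      "éss" :: (if PySem.Str.lower (rest.getD 0 "") = "que" then "ke" else "ki") ::
        handle_est_ce_que (rest.drop 1)
    else
      w :: handle_est_ce_que rest
termination_by l => l.length
decreasing_by all_goals simp [List.length_drop]

-- ===== PORT B =====
-- Source B's for-loop as structural recursion: the state number and pending buffer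
-- are carried exactly as in the Python; output is the recursion's result.
def fsmGo (state : Nat) (buf : List String) : List String → List String
  | [] => buf
  | w :: rest =>
    if state = 1 ∧ PySem.Str.lower w = "est" then fsmGo 2 (buf ++ [w]) rest
    else if state = 2 ∧ (PySem.Str.lower w = "ce" ∨ PySem.Str.lower w = "c'") then
      fsmGo 3 (buf ++ [w]) rest
    else if state = 3 ∧ (PySem.Str.lower w = "que" ∨ PySem.Str.lower w = "qui") then
      "késs" :: (if PySem.Str.lower w = "que" then "ke" else "ki") :: fsmGo 0 [] rest
    else if state = 4 ∧ (PySem.Str.lower w = "ce" ∨ PySem.Str.lower w = "c'") then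
      fsmGo 5 (buf ++ [w]) rest
    else if (state = 5 ∨ state = 6) ∧ (PySem.Str.lower w = "que" ∨ PySem.Str.lower w = "qui") then
      "éss" :: (if PySem.Str.lower w = "que" then "ke" else "ki") :: fsmGo 0 [] rest
    else
      buf ++ (if PySem.Str.lower w = "qu'" ∨ PySem.Str.lower w = "que" then fsmGo 1 [w] rest
        else if PySem.Str.lower w = "est" then fsmGo 4 [w] rest
        else if PySem.Str.lower w = "est-ce" then fsmGo 6 [w] rest
        else if PySem.Str.lower w = "est-ce-que" ∨ PySem.Str.lower w = "est-ce-qui" then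
          "éss" :: (if PySem.Str.lower w = "est-ce-que" then "ke" else "ki") :: fsmGo 0 [] rest
        else w :: fsmGo 0 [] rest)

def handle_est_ce_que_alt (words : List String) : List String := fsmGo 0 [] words

-- ===== PRECONDITION & SPEC =====
def Spec_handle_est_ce_que (words : List String) (out : List String) : Prop := out = handle_est_ce_que_alt words
instance (words : List String) (out : List String) : Decidable (Spec_handle_est_ce_que words out) := by unfold Spec_handle_est_ce_que; infer_instance

-- ===== CLAIM (what is proved, stated in full; the proofs are below) =====
def Claim_equal_handle_est_ce_que : Prop := ∀ (words : List String), Dom_handle_est_ce_que words → Spec_handle_est_ce_que words (handle_est_ce_que words)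

-- ===== LEMMAS AND PROOFS =====

-- the content of fsmGo's final else branch (proof abbreviation only)
def fsmDispatch (w : String) (rest : List String) : List String :=
  if PySem.Str.lower w = "qu'" ∨ PySem.Str.lower w = "que" then fsmGo 1 [w] rest
  else if PySem.Str.lower w = "est" then fsmGo 4 [w] rest
  else if PySem.Str.lower w = "est-ce" then fsmGo 6 [w] rest
  else if PySem.Str.lower w = "est-ce-que" ∨ PySem.Str.lower w = "est-ce-qui" then
    "éss" :: (if PySem.Str.lower w = "est-ce-que" then "ke" else "ki") :: fsmGo 0 [] rest
  else w :: fsmGo 0 [] rest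

-- fsmGo reduction lemmas, per state
theorem fsm_nil (s : Nat) (b : List String) : fsmGo s b [] = b := by rw [fsmGo]

theorem fsm_s0 (b : List String) (w : String) (rest : List String) :
    fsmGo 0 b (w :: rest) = b ++ fsmDispatch w rest := by
  rw [fsmGo]; simp [fsmDispatch]

theorem fsm_s1_est (b : List String) (w : String) (rest : List String)
    (h : PySem.Str.lower w = "est") : fsmGo 1 b (w :: rest) = fsmGo 2 (b ++ [w]) rest := by
  rw [fsmGo]; simp [h]

theorem fsm_s1_no (b : List String) (w : String) (rest : List String)
    (h : ¬ PySem.Str.lower w = "est") : fsmGo 1 b (w :: rest) = b ++ fsmDispatch w rest := by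
  rw [fsmGo]; simp [h, fsmDispatch]

theorem fsm_s2_ce (b : List String) (w : String) (rest : List String)
    (h : PySem.Str.lower w = "ce" ∨ PySem.Str.lower w = "c'") :
    fsmGo 2 b (w :: rest) = fsmGo 3 (b ++ [w]) rest := by
  rw [fsmGo]; rcases h with h | h <;> simp [h]

theorem fsm_s2_no (b : List String) (w : String) (rest : List String)
    (h1 : ¬ PySem.Str.lower w = "ce") (h2 : ¬ PySem.Str.lower w = "c'") :
    fsmGo 2 b (w :: rest) = b ++ fsmDispatch w rest := by
  rw [fsmGo]; simp [h1, h2, fsmDispatch]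

theorem fsm_s3_fin (b : List String) (w : String) (rest : List String)
    (h : PySem.Str.lower w = "que" ∨ PySem.Str.lower w = "qui") :
    fsmGo 3 b (w :: rest) =
      "késs" :: (if PySem.Str.lower w = "que" then "ke" else "ki") :: fsmGo 0 [] rest := by
  rw [fsmGo]; rcases h with h | h <;> simp [h]

theorem fsm_s3_no (b : List String) (w : String) (rest : List String)
    (h1 : ¬ PySem.Str.lower w = "que") (h2 : ¬ PySem.Str.lower w = "qui") :
    fsmGo 3 b (w :: rest) = b ++ fsmDispatch w rest := by
  rw [fsmGo]; simp [h1, h2, fsmDispatch]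

theorem fsm_s4_ce (b : List String) (w : String) (rest : List String)
    (h : PySem.Str.lower w = "ce" ∨ PySem.Str.lower w = "c'") :
    fsmGo 4 b (w :: rest) = fsmGo 5 (b ++ [w]) rest := by
  rw [fsmGo]; rcases h with h | h <;> simp [h]

theorem fsm_s4_no (b : List String) (w : String) (rest : List String)
    (h1 : ¬ PySem.Str.lower w = "ce") (h2 : ¬ PySem.Str.lower w = "c'") :
    fsmGo 4 b (w :: rest) = b ++ fsmDispatch w rest := by
  rw [fsmGo]; simp [h1, h2, fsmDispatch]

theorem fsm_s5_fin (b : List String) (w : String) (rest : List String)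
    (h : PySem.Str.lower w = "que" ∨ PySem.Str.lower w = "qui") :
    fsmGo 5 b (w :: rest) =
      "éss" :: (if PySem.Str.lower w = "que" then "ke" else "ki") :: fsmGo 0 [] rest := by
  rw [fsmGo]; rcases h with h | h <;> simp [h]

theorem fsm_s5_no (b : List String) (w : String) (rest : List String)
    (h1 : ¬ PySem.Str.lower w = "que") (h2 : ¬ PySem.Str.lower w = "qui") :
    fsmGo 5 b (w :: rest) = b ++ fsmDispatch w rest := by
  rw [fsmGo]; simp [h1, h2, fsmDispatch]

theorem fsm_s6_fin (b : List String) (w : String) (rest : List String)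
    (h : PySem.Str.lower w = "que" ∨ PySem.Str.lower w = "qui") :
    fsmGo 6 b (w :: rest) =
      "éss" :: (if PySem.Str.lower w = "que" then "ke" else "ki") :: fsmGo 0 [] rest := by
  rw [fsmGo]; rcases h with h | h <;> simp [h]

theorem fsm_s6_no (b : List String) (w : String) (rest : List String)
    (h1 : ¬ PySem.Str.lower w = "que") (h2 : ¬ PySem.Str.lower w = "qui") :
    fsmGo 6 b (w :: rest) = b ++ fsmDispatch w rest := by
  rw [fsmGo]; simp [h1, h2, fsmDispatch]

-- A-side step lemmas
theorem A_emit (w : String) (rest : List String)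
    (h1 : ¬ (3 ≤ rest.length ∧ (PySem.Str.lower w = "qu'" ∨ PySem.Str.lower w = "que") ∧
        PySem.Str.lower (rest.getD 0 "") = "est" ∧
        (PySem.Str.lower (rest.getD 1 "") = "ce" ∨ PySem.Str.lower (rest.getD 1 "") = "c'") ∧
        (PySem.Str.lower (rest.getD 2 "") = "que" ∨ PySem.Str.lower (rest.getD 2 "") = "qui")))
    (h2 : ¬ (PySem.Str.lower w = "est-ce-que" ∨ PySem.Str.lower w = "est-ce-qui"))
    (h3 : ¬ (2 ≤ rest.length ∧ PySem.Str.lower w = "est" ∧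
        (PySem.Str.lower (rest.getD 0 "") = "ce" ∨ PySem.Str.lower (rest.getD 0 "") = "c'") ∧
        (PySem.Str.lower (rest.getD 1 "") = "que" ∨ PySem.Str.lower (rest.getD 1 "") = "qui")))
    (h4 : ¬ (1 ≤ rest.length ∧ PySem.Str.lower w = "est-ce" ∧
        (PySem.Str.lower (rest.getD 0 "") = "que" ∨ PySem.Str.lower (rest.getD 0 "") = "qui"))) :
    handle_est_ce_que (w :: rest) = w :: handle_est_ce_que rest := by
  rw [handle_est_ce_que, if_neg h1, if_neg h2, if_neg h3, if_neg h4]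

set_option maxHeartbeats 1000000 in
theorem A_fire1 (q e c w : String) (rest : List String)
    (hq : PySem.Str.lower q = "qu'" ∨ PySem.Str.lower q = "que")
    (he : PySem.Str.lower e = "est")
    (hc : PySem.Str.lower c = "ce" ∨ PySem.Str.lower c = "c'")
    (hw : PySem.Str.lower w = "que" ∨ PySem.Str.lower w = "qui") :
    handle_est_ce_que (q :: e :: c :: w :: rest) =
      "késs" :: (if PySem.Str.lower w = "que" then "ke" else "ki") :: handle_est_ce_que rest := by
  rw [handle_est_ce_que]
  rcases hq with hq | hq <;> rcases hc with hc | hc <;> rcases hw with hw | hw <;>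
    simp [hq, he, hc, hw]

set_option maxHeartbeats 1000000 in
theorem A_fire2 (w : String) (rest : List String)
    (hw : PySem.Str.lower w = "est-ce-que" ∨ PySem.Str.lower w = "est-ce-qui") :
    handle_est_ce_que (w :: rest) =
      "éss" :: (if PySem.Str.lower w = "est-ce-que" then "ke" else "ki") ::
        handle_est_ce_que rest := by
  rw [handle_est_ce_que]
  rcases hw with hw | hw <;> simp [hw]

set_option maxHeartbeats 1000000 in
theorem A_fire3 (e c w : String) (rest : List String)
    (he : PySem.Str.lower e = "est")
    (hc : PySem.Str.lower c = "ce" ∨ PySem.Str.lower c = "c'")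
    (hw : PySem.Str.lower w = "que" ∨ PySem.Str.lower w = "qui") :
    handle_est_ce_que (e :: c :: w :: rest) =
      "éss" :: (if PySem.Str.lower w = "que" then "ke" else "ki") :: handle_est_ce_que rest := by
  rw [handle_est_ce_que]
  rcases hc with hc | hc <;> rcases hw with hw | hw <;> simp [he, hc, hw]

set_option maxHeartbeats 1000000 in
theorem A_fire4 (s w : String) (rest : List String)
    (hs : PySem.Str.lower s = "est-ce")
    (hw : PySem.Str.lower w = "que" ∨ PySem.Str.lower w = "qui") :
    handle_est_ce_que (s :: w :: rest) =
      "éss" :: (if PySem.Str.lower w = "que" then "ke" else "ki") :: handle_est_ce_que rest := by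
  rw [handle_est_ce_que]
  rcases hw with hw | hw <;> simp [hs, hw]

-- the reachable FSM configurations, with the lowered shape of the buffer
def ValidCfg (state : Nat) (buf : List String) : Prop :=
  (state = 0 ∧ buf = []) ∨
  (state = 1 ∧ ∃ q, buf = [q] ∧ (PySem.Str.lower q = "qu'" ∨ PySem.Str.lower q = "que")) ∨
  (state = 2 ∧ ∃ q e, buf = [q, e] ∧ (PySem.Str.lower q = "qu'" ∨ PySem.Str.lower q = "que") ∧
      PySem.Str.lower e = "est") ∨
  (state = 3 ∧ ∃ q e c, buf = [q, e, c] ∧ (PySem.Str.lower q = "qu'" ∨ PySem.Str.lower q = "que") ∧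
      PySem.Str.lower e = "est" ∧ (PySem.Str.lower c = "ce" ∨ PySem.Str.lower c = "c'")) ∨
  (state = 4 ∧ ∃ e, buf = [e] ∧ PySem.Str.lower e = "est") ∨
  (state = 5 ∧ ∃ e c, buf = [e, c] ∧ PySem.Str.lower e = "est" ∧
      (PySem.Str.lower c = "ce" ∨ PySem.Str.lower c = "c'")) ∨
  (state = 6 ∧ ∃ s, buf = [s] ∧ PySem.Str.lower s = "est-ce")

theorem valid0 : ValidCfg 0 [] := Or.inl ⟨rfl, rfl⟩
theorem valid1 (q : String) (hq : PySem.Str.lower q = "qu'" ∨ PySem.Str.lower q = "que") :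
    ValidCfg 1 [q] := Or.inr (Or.inl ⟨rfl, q, rfl, hq⟩)
theorem valid2 (q e : String) (hq : PySem.Str.lower q = "qu'" ∨ PySem.Str.lower q = "que")
    (he : PySem.Str.lower e = "est") : ValidCfg 2 [q, e] :=
  Or.inr (Or.inr (Or.inl ⟨rfl, q, e, rfl, hq, he⟩))
theorem valid3 (q e c : String) (hq : PySem.Str.lower q = "qu'" ∨ PySem.Str.lower q = "que")
    (he : PySem.Str.lower e = "est") (hc : PySem.Str.lower c = "ce" ∨ PySem.Str.lower c = "c'") :
    ValidCfg 3 [q, e, c] := Or.inr (Or.inr (Or.inr (Or.inl ⟨rfl, q, e, c, rfl, hq, he, hc⟩)))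
theorem valid4 (e : String) (he : PySem.Str.lower e = "est") : ValidCfg 4 [e] :=
  Or.inr (Or.inr (Or.inr (Or.inr (Or.inl ⟨rfl, e, rfl, he⟩))))
theorem valid5 (e c : String) (he : PySem.Str.lower e = "est")
    (hc : PySem.Str.lower c = "ce" ∨ PySem.Str.lower c = "c'") : ValidCfg 5 [e, c] :=
  Or.inr (Or.inr (Or.inr (Or.inr (Or.inr (Or.inl ⟨rfl, e, c, rfl, he, hc⟩)))))
theorem valid6 (s : String) (hs : PySem.Str.lower s = "est-ce") : ValidCfg 6 [s] :=
  Or.inr (Or.inr (Or.inr (Or.inr (Or.inr (Or.inr ⟨rfl, s, rfl, hs⟩)))))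

-- the fresh-start dispatch agrees with A on w :: rest, given the IH on rest
set_option maxHeartbeats 1000000 in
theorem dispatch_eq (w : String) (rest : List String)
    (ih : ∀ st b, ValidCfg st b → fsmGo st b rest = handle_est_ce_que (b ++ rest)) :
    fsmDispatch w rest = handle_est_ce_que (w :: rest) := by
  unfold fsmDispatch
  by_cases hqw : PySem.Str.lower w = "qu'" ∨ PySem.Str.lower w = "que"
  · rw [if_pos hqw]; simpa using ih 1 [w] (valid1 w hqw)
  · rw [if_neg hqw]
    by_cases hew : PySem.Str.lower w = "est"
    · rw [if_pos hew]; simpa using ih 4 [w] (valid4 w hew)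
    · rw [if_neg hew]
      by_cases hcw : PySem.Str.lower w = "est-ce"
      · rw [if_pos hcw]; simpa using ih 6 [w] (valid6 w hcw)
      · rw [if_neg hcw]
        by_cases hfw : PySem.Str.lower w = "est-ce-que" ∨ PySem.Str.lower w = "est-ce-qui"
        · rw [if_pos hfw, ih 0 [] valid0]
          simpa using (A_fire2 w rest hfw).symm
        · rw [if_neg hfw, ih 0 [] valid0]
          push_neg at hqw hfw
          refine (A_emit w rest ?_ ?_ ?_ ?_).symm
          · simp [hqw.1, hqw.2]
          · simp [hfw.1, hfw.2]
          · simp [hew]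
          · simp [hcw]

-- Main invariant: from any reachable configuration, the FSM's remaining output
-- equals A's output on the buffered tokens followed by the remaining input.
set_option maxHeartbeats 2000000 in
theorem fsmGo_eq (l : List String) : ∀ state buf, ValidCfg state buf →
    fsmGo state buf l = handle_est_ce_que (buf ++ l) := by
  induction l with
  | nil =>
    rintro state buf (⟨rfl, rfl⟩ | ⟨rfl, q, rfl, hq⟩ | ⟨rfl, q, e, rfl, hq, he⟩ |
      ⟨rfl, q, e, c, rfl, hq, he, hc⟩ | ⟨rfl, e, rfl, he⟩ | ⟨rfl, e, c, rfl, he, hc⟩ |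
      ⟨rfl, s, rfl, hs⟩)
    · simp [fsm_nil, handle_est_ce_que]
    · rcases hq with h | h <;> simp [fsm_nil, handle_est_ce_que, h]
    · rcases hq with h | h <;> simp [fsm_nil, handle_est_ce_que, h, he]
    · rcases hq with h | h <;> rcases hc with h2 | h2 <;>
        simp [fsm_nil, handle_est_ce_que, h, he, h2]
    · simp [fsm_nil, handle_est_ce_que, he]
    · rcases hc with h2 | h2 <;> simp [fsm_nil, handle_est_ce_que, he, h2]
    · simp [fsm_nil, handle_est_ce_que, hs]
  | cons w rest ih =>
    rintro state buf (⟨rfl, rfl⟩ | ⟨rfl, q, rfl, hq⟩ | ⟨rfl, q, e, rfl, hq, he⟩ |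
      ⟨rfl, q, e, c, rfl, hq, he, hc⟩ | ⟨rfl, e, rfl, he⟩ | ⟨rfl, e, c, rfl, he, hc⟩ |
      ⟨rfl, s, rfl, hs⟩)
    -- state 0
    · rw [fsm_s0, dispatch_eq w rest ih]; simp
    -- state 1, buf = [q]
    · by_cases hew : PySem.Str.lower w = "est"
      · rw [fsm_s1_est _ _ _ hew]
        simpa using ih 2 [q, w] (valid2 q w hq hew)
      · rw [fsm_s1_no _ _ _ hew, dispatch_eq w rest ih]
        have hA : handle_est_ce_que (q :: w :: rest) = q :: handle_est_ce_que (w :: rest) := by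
          refine A_emit q (w :: rest) ?_ ?_ ?_ ?_
          · simp [hew]
          · rcases hq with h | h <;> simp [h]
          · rcases hq with h | h <;> simp [h]
          · rcases hq with h | h <;> simp [h]
        simp [hA]
    -- state 2, buf = [q, e]
    · by_cases hcw : PySem.Str.lower w = "ce" ∨ PySem.Str.lower w = "c'"
      · rw [fsm_s2_ce _ _ _ hcw]
        simpa using ih 3 [q, e, w] (valid3 q e w hq he hcw)
      · push_neg at hcw
        rw [fsm_s2_no _ _ _ hcw.1 hcw.2, dispatch_eq w rest ih]
        have hA1 : handle_est_ce_que (e :: w :: rest) = e :: handle_est_ce_que (w :: rest) := by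
          refine A_emit e (w :: rest) ?_ ?_ ?_ ?_
          · simp [he]
          · simp [he]
          · simp [hcw.1, hcw.2]
          · simp [he]
        have hA2 : handle_est_ce_que (q :: e :: w :: rest) =
            q :: handle_est_ce_que (e :: w :: rest) := by
          refine A_emit q (e :: w :: rest) ?_ ?_ ?_ ?_
          · simp [hcw.1, hcw.2]
          · rcases hq with h | h <;> simp [h]
          · rcases hq with h | h <;> simp [h]
          · rcases hq with h | h <;> simp [h]
        simp [hA2, hA1]
    -- state 3, buf = [q, e, c]
    · by_cases hkw : PySem.Str.lower w = "que" ∨ PySem.Str.lower w = "qui"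
      · rw [fsm_s3_fin _ _ _ hkw, ih 0 [] valid0]
        simpa using (A_fire1 q e c w rest hq he hc hkw).symm
      · push_neg at hkw
        rw [fsm_s3_no _ _ _ hkw.1 hkw.2, dispatch_eq w rest ih]
        have hA1 : handle_est_ce_que (c :: w :: rest) = c :: handle_est_ce_que (w :: rest) := by
          refine A_emit c (w :: rest) ?_ ?_ ?_ ?_ <;> rcases hc with h | h <;> simp [h]
        have hA2 : handle_est_ce_que (e :: c :: w :: rest) =
            e :: handle_est_ce_que (c :: w :: rest) := by
          refine A_emit e (c :: w :: rest) ?_ ?_ ?_ ?_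
          · simp [he]
          · simp [he]
          · simp [hkw.1, hkw.2]
          · simp [he]
        have hA3 : handle_est_ce_que (q :: e :: c :: w :: rest) =
            q :: handle_est_ce_que (e :: c :: w :: rest) := by
          refine A_emit q (e :: c :: w :: rest) ?_ ?_ ?_ ?_
          · simp [hkw.1, hkw.2]
          · rcases hq with h | h <;> simp [h]
          · rcases hq with h | h <;> simp [h]
          · rcases hq with h | h <;> simp [h]
        simp [hA3, hA2, hA1]
    -- state 4, buf = [e]
    · by_cases hcw : PySem.Str.lower w = "ce" ∨ PySem.Str.lower w = "c'"
      · rw [fsm_s4_ce _ _ _ hcw]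
        simpa using ih 5 [e, w] (valid5 e w he hcw)
      · push_neg at hcw
        rw [fsm_s4_no _ _ _ hcw.1 hcw.2, dispatch_eq w rest ih]
        have hA : handle_est_ce_que (e :: w :: rest) = e :: handle_est_ce_que (w :: rest) := by
          refine A_emit e (w :: rest) ?_ ?_ ?_ ?_
          · simp [he]
          · simp [he]
          · simp [hcw.1, hcw.2]
          · simp [he]
        simp [hA]
    -- state 5, buf = [e, c]
    · by_cases hkw : PySem.Str.lower w = "que" ∨ PySem.Str.lower w = "qui"
      · rw [fsm_s5_fin _ _ _ hkw, ih 0 [] valid0]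
        simpa using (A_fire3 e c w rest he hc hkw).symm
      · push_neg at hkw
        rw [fsm_s5_no _ _ _ hkw.1 hkw.2, dispatch_eq w rest ih]
        have hA1 : handle_est_ce_que (c :: w :: rest) = c :: handle_est_ce_que (w :: rest) := by
          refine A_emit c (w :: rest) ?_ ?_ ?_ ?_ <;> rcases hc with h | h <;> simp [h]
        have hA2 : handle_est_ce_que (e :: c :: w :: rest) =
            e :: handle_est_ce_que (c :: w :: rest) := by
          refine A_emit e (c :: w :: rest) ?_ ?_ ?_ ?_
          · simp [he]
          · simp [he]
          · simp [hkw.1, hkw.2]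
          · simp [he]
        simp [hA2, hA1]
    -- state 6, buf = [s]
    · by_cases hkw : PySem.Str.lower w = "que" ∨ PySem.Str.lower w = "qui"
      · rw [fsm_s6_fin _ _ _ hkw, ih 0 [] valid0]
        simpa using (A_fire4 s w rest hs hkw).symm
      · push_neg at hkw
        rw [fsm_s6_no _ _ _ hkw.1 hkw.2, dispatch_eq w rest ih]
        have hA : handle_est_ce_que (s :: w :: rest) = s :: handle_est_ce_que (w :: rest) := by
          refine A_emit s (w :: rest) ?_ ?_ ?_ ?_
          · simp [hs]
          · simp [hs]
          · simp [hs]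
          · simp [hkw.1, hkw.2]
        simp [hA]

-- ===== VERDICT (by name: the statement is the Claim_ definition above) =====
theorem handle_est_ce_que_spec : Claim_equal_handle_est_ce_que := by
  intro words _
  unfold Spec_handle_est_ce_que handle_est_ce_que_alt
  exact (fsmGo_eq words 0 [] valid0).symm.trans (by simp)
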